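-- pv_equiv track=rewrite | github.com/pytraveler/comfyui-darkil-nodes | nodes/text/directives.py | directive_list_and
-- ===== SOURCE A (Python) =====
-- def directive_list_and(text: str) -> str:
--     lines = [ln.strip() for ln in text.splitlines()]
--     non_empty = [ln for ln in lines if ln]
--     if non_empty:
--         last_word = non_empty.pop()
--     else:
--         last_word = ""
--     result = ", ".join(non_empty)
--     if not result:
--         result = last_word
--     else:
--         result = f"{result} and {last_word}"
--     return result.strip()
-- ===== SOURCE B (Python) =====
-- def directive_list_and(text: str) -> str:
--     # Single streaming pass: no intermediate item list, no join; keeps the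
--     # prefix built so far and the pending (possibly last) item.
--     prefix = ""
--     pending = None
--     for ln in text.splitlines():
--         s = ln.strip()
--         if not s:
--             continue
--         if pending is not None:
--             prefix = pending if not prefix else prefix + ", " + pending
--         pending = s
--     if pending is None:
--         return ""
--     if not prefix:
--         return pending
--     return prefix + " and " + pending
-- ===== Notes on version B (the rewrite author's own statement) =====
-- stated objective: alternative
-- what changed: B replaces A's staged passes (strip-map, filter, pop the last, ', '.join, emptiness test) by one streaming loop over the lines that keeps only a joined-prefix string and the pending last item, building the result incrementally with no intermediate item list and no join call.
import Mathlib
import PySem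

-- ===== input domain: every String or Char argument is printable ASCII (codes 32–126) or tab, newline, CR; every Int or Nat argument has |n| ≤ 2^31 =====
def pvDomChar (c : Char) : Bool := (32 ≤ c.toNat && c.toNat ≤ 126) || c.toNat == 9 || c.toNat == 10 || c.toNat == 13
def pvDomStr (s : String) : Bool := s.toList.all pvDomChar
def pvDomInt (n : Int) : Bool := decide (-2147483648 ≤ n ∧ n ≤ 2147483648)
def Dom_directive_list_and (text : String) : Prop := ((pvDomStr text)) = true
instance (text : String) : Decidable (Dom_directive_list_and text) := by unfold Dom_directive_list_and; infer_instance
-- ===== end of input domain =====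

-- B replaces A's staged passes (strip-map, filter, pop, ', '.join, emptiness test) with one
-- streaming loop over the lines keeping only a joined-prefix string and the pending last item
-- (alternative decomposition, same cost).

-- ===== PORT A =====
def directive_list_and (text : String) : String :=
  -- lines = [ln.strip() for ln in text.splitlines()]
  let lines := (PySem.Chars.splitlines text.toList).map PySem.Chars.strip
  -- non_empty = [ln for ln in lines if ln]
  let nonEmpty := lines.filter (fun l => !l.isEmpty)
  -- if non_empty: last_word = non_empty.pop()  else: last_word = ""
  let st :=
    match PySem.List.pop? nonEmpty with
    | some (x, rest) => (rest, x)
    | none => (nonEmpty, ([] : List Char))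
  -- result = ", ".join(non_empty)
  let result := PySem.Chars.join ", ".toList st.1
  -- if not result: result = last_word  else: result = f"{result} and {last_word}"
  let result2 := if result.isEmpty then st.2 else result ++ " and ".toList ++ st.2
  -- return result.strip()
  String.ofList (PySem.Chars.strip result2)

-- ===== PORT B =====
-- loop body of Source B: state = (prefix, pending)
def pvStepB (st : List Char × Option (List Char)) (ln : List Char) : List Char × Option (List Char) :=
  let s := PySem.Chars.strip ln                 -- s = ln.strip()
  if s.isEmpty then st                          -- if not s: continue
  else
    match st.2 with                             -- if pending is not None: prefix = …
    | none => (st.1, some s)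
    | some p => ((if st.1.isEmpty then p else st.1 ++ ", ".toList ++ p), some s)

def directive_list_and_alt (text : String) : String :=
  -- for ln in text.splitlines(): …
  let st := (PySem.Chars.splitlines text.toList).foldl pvStepB ([], none)
  match st.2 with
  | none => ""                                      -- if pending is None: return ""
  | some p =>
      if st.1.isEmpty then String.ofList p          -- if not prefix: return pending
      else String.ofList (st.1 ++ " and ".toList ++ p)   -- return prefix + " and " + pending

-- ===== PRECONDITION & SPEC =====
def Spec_directive_list_and (text : String) (out : String) : Prop := out = directive_list_and_alt text
instance (text : String) (out : String) : Decidable (Spec_directive_list_and text out) := by unfold Spec_directive_list_and; infer_instance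

-- ===== CLAIM (what is proved, stated in full; the proofs are below) =====
def Claim_equal_directive_list_and : Prop := ∀ (text : String), Dom_directive_list_and text → Spec_directive_list_and text (directive_list_and text)

-- ===== LEMMAS AND PROOFS =====

-- the stripped non-empty items of a line list, as one filterMap
def pvItems (lns : List (List Char)) : List (List Char) :=
  lns.filterMap (fun ln => let s := PySem.Chars.strip ln; if s.isEmpty then none else some s)

-- common normal form both programs are reduced to
def pvAltCore (items : List (List Char)) : String :=
  match items with
  | [] => ""
  | [x] => String.ofList x
  | x :: y :: t =>
      String.ofList (PySem.Chars.join ", ".toList (x :: y :: t).dropLast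
                 ++ " and ".toList ++ (y :: t).getLast (by simp))

theorem pv_filterMap_eq (lns : List (List Char)) :
    pvItems lns = (lns.map PySem.Chars.strip).filter (fun l => !l.isEmpty) := by
  unfold pvItems
  induction lns with
  | nil => rfl
  | cons a t ih =>
    simp only [List.filterMap_cons, List.map_cons, List.filter_cons, ih]
    by_cases h : (PySem.Chars.strip a).isEmpty <;> simp [h]

theorem pv_items_ne (lns : List (List Char)) : ∀ l ∈ pvItems lns, l ≠ [] := by
  intro l hl
  unfold pvItems at hl
  simp only [List.mem_filterMap] at hl
  obtain ⟨ln, _, h⟩ := hl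
  by_cases he : (PySem.Chars.strip ln).isEmpty <;> simp [he] at h
  · rw [← h]; simpa using he

-- a string with no whitespace at either end is fixed by strip
theorem pv_strip_of_noedge (cs : List Char)
    (h1 : ∀ c ∈ cs.head?, PySem.Chars.isspace c = false)
    (h2 : ∀ c ∈ cs.getLast?, PySem.Chars.isspace c = false) :
    PySem.Chars.strip cs = cs := by
  unfold PySem.Chars.strip PySem.Chars.lstrip PySem.Chars.rstrip
  have hl : List.dropWhile PySem.Chars.isspace cs = cs := by
    rw [List.dropWhile_eq_self_iff]
    intro hl
    have := h1 cs[0] (by rw [List.head?_eq_getElem?]; simp)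
    simp [this]
  rw [hl]
  have hr : List.dropWhile PySem.Chars.isspace cs.reverse = cs.reverse := by
    rw [List.dropWhile_eq_self_iff]
    intro hlen
    have hne : cs ≠ [] := by
      intro h; subst h; simp at hlen
    have : cs.reverse[0] = cs.getLast hne := by
      simp [List.getLast_eq_getElem, List.getElem_reverse]
    rw [this]
    have := h2 (cs.getLast hne) (by rw [List.getLast?_eq_some_getLast hne]; rfl)
    simp [this]
  rw [hr, List.reverse_reverse]

-- head of dropWhile is not accepted by the predicate
theorem pv_head_dropWhile {α : Type} (p : α → Bool) (l : List α) :
    ∀ c ∈ (List.dropWhile p l).head?, p c = false := by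
  induction l with
  | nil => simp
  | cons a t ih =>
    intro c hc
    rw [List.dropWhile_cons] at hc
    split at hc
    · exact ih c hc
    · next h =>
      simp at hc
      subst hc
      simpa using h

theorem pv_noedge_head (cs : List Char) :
    ∀ c ∈ (PySem.Chars.strip cs).head?, PySem.Chars.isspace c = false := by
  unfold PySem.Chars.strip PySem.Chars.rstrip PySem.Chars.lstrip
  intro c hc
  rcases hr : (List.dropWhile PySem.Chars.isspace (List.dropWhile PySem.Chars.isspace cs).reverse) with _ | ⟨a, t⟩
  · rw [hr] at hc; simp at hc
  · have hsuf : (a :: t) <:+ (List.dropWhile PySem.Chars.isspace cs).reverse := by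
      rw [← hr]; exact List.dropWhile_suffix _
    rw [hr] at hc
    rw [List.head?_reverse] at hc
    obtain ⟨pre, hpre⟩ := hsuf
    have hgl : (List.dropWhile PySem.Chars.isspace cs).reverse.getLast? = (a :: t).getLast? := by
      rw [← hpre, List.getLast?_append]
      exact Option.or_of_isSome (by simp [List.getLast?_isSome])
    rw [List.getLast?_reverse] at hgl
    rw [← hgl] at hc
    exact pv_head_dropWhile _ cs c hc

theorem pv_noedge_last (cs : List Char) :
    ∀ c ∈ (PySem.Chars.strip cs).getLast?, PySem.Chars.isspace c = false := by
  unfold PySem.Chars.strip PySem.Chars.rstrip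
  intro c hc
  rw [List.getLast?_reverse] at hc
  exact pv_head_dropWhile _ _ c hc

theorem pv_strip_idem (cs : List Char) :
    PySem.Chars.strip (PySem.Chars.strip cs) = PySem.Chars.strip cs :=
  pv_strip_of_noedge _ (pv_noedge_head cs) (pv_noedge_last cs)

-- join over ", " starting from a nonempty first part keeps the head of that part
theorem pv_join_head (x : List Char) (xs : List (List Char)) (hx : x ≠ []) :
    (PySem.Chars.join ", ".toList (x :: xs)).head? = x.head? := by
  unfold PySem.Chars.join
  rw [List.intercalate]
  cases xs with
  | nil => simp
  | cons b t =>
    simp only [List.intersperse_cons₂, List.flatten_cons, List.head?_append]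
    rw [Option.or_of_isSome (by simpa [List.isSome_head?] using hx)]

theorem pv_join_ne (x : List Char) (xs : List (List Char)) (hx : x ≠ []) :
    PySem.Chars.join ", ".toList (x :: xs) ≠ [] := by
  intro h
  have h2 := congrArg List.head? h
  rw [pv_join_head x xs hx] at h2
  simp only [List.head?_nil] at h2
  exact hx (List.head?_eq_none_iff.mp h2)

theorem pv_join_cons₂ (a b : List Char) (t : List (List Char)) :
    PySem.Chars.join ", ".toList (a :: b :: t)
      = a ++ ", ".toList ++ PySem.Chars.join ", ".toList (b :: t) := by
  unfold PySem.Chars.join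
  simp [List.intercalate, List.intersperse_cons₂, List.append_assoc]

theorem pv_join_snoc (xs : List (List Char)) (y : List Char) (h : xs ≠ []) :
    PySem.Chars.join ", ".toList (xs ++ [y])
      = PySem.Chars.join ", ".toList xs ++ ", ".toList ++ y := by
  induction xs with
  | nil => exact absurd rfl h
  | cons a t ih =>
    cases t with
    | nil =>
      rw [List.cons_append, List.nil_append, pv_join_cons₂]
      simp [PySem.Chars.join, List.intercalate]
    | cons b t' =>
      have ih' := ih (by simp)
      simp only [List.cons_append] at ih' ⊢
      rw [pv_join_cons₂ a b (t' ++ [y]), ih', pv_join_cons₂ a b t']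
      simp [List.append_assoc]

theorem pv_eraseIdx_last (xs : List (List Char)) : xs.eraseIdx (xs.length - 1) = xs.dropLast := by
  rw [List.eraseIdx_eq_take_drop_succ, List.dropLast_eq_take]
  cases xs with
  | nil => simp
  | cons a t => simp [List.drop_eq_nil_of_le]

theorem pv_pop_eq (l : List Char) (t : List (List Char)) :
    PySem.List.pop? (l :: t) = some ((l :: t).getLast (by simp), (l :: t).dropLast) := by
  unfold PySem.List.pop? PySem.List.pyIdx?
  rw [if_neg (by norm_num), if_pos (by simp)]
  have hk : (l :: t).length - (-(-1:Int)).toNat = (l :: t).length - 1 := by norm_num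
  rw [hk, Option.bind_some, List.getElem?_eq_getElem (by simp), Option.map_some]
  refine congrArg some (Prod.ext ?_ ?_)
  · simp [List.getLast_eq_getElem]
  · exact pv_eraseIdx_last (l :: t)

-- invariant of B's streaming loop: the state is (join of all items but the last, last item)
theorem pv_fold_eq (L : List (List Char)) :
    L.foldl pvStepB ([], none)
      = (PySem.Chars.join ", ".toList (pvItems L).dropLast, (pvItems L).getLast?) := by
  induction L using List.reverseRecOn with
  | nil => simp [pvItems, PySem.Chars.join, List.intercalate]
  | append_singleton L ln ih =>
    rw [List.foldl_append, List.foldl_cons, List.foldl_nil, ih]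
    have hitems : pvItems (L ++ [ln])
        = pvItems L ++ (if (PySem.Chars.strip ln).isEmpty then [] else [PySem.Chars.strip ln]) := by
      unfold pvItems
      rw [List.filterMap_append]
      by_cases h : (PySem.Chars.strip ln).isEmpty
      · simp [List.isEmpty_iff.mp h]
      · have hne : PySem.Chars.strip ln ≠ [] := by simpa [List.isEmpty_iff] using h
        simp [h, hne]
    by_cases hs : (PySem.Chars.strip ln).isEmpty
    · rw [hitems, if_pos hs, List.append_nil]
      simp [pvStepB, hs]
    · rw [hitems, if_neg hs]
      rcases hI : (pvItems L).getLast? with _ | p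
      · have hInil : pvItems L = [] := List.getLast?_eq_none_iff.mp hI
        simp [pvStepB, hs, hInil, PySem.Chars.join, List.intercalate]
      · have hIne : pvItems L ≠ [] := by
          intro h; rw [h] at hI; simp at hI
        have hsplit : (pvItems L).dropLast ++ [p] = pvItems L := by
          have h1 := List.dropLast_append_getLast hIne
          have h2 : (pvItems L).getLast hIne = p := by
            have h3 := List.getLast?_eq_some_getLast hIne
            rw [h3] at hI
            exact Option.some.inj hI
          rw [← h2]; exact h1
        rw [List.dropLast_concat, List.getLast?_concat]
        have hstep : pvStepB (PySem.Chars.join ", ".toList (pvItems L).dropLast, some p) ln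
            = ((if (PySem.Chars.join ", ".toList (pvItems L).dropLast).isEmpty then p
                else PySem.Chars.join ", ".toList (pvItems L).dropLast ++ ", ".toList ++ p),
               some (PySem.Chars.strip ln)) := by
          simp only [pvStepB]
          rw [if_neg hs]
        rw [hstep]
        refine Prod.ext ?_ rfl
        show (if (PySem.Chars.join ", ".toList (pvItems L).dropLast).isEmpty then p
              else PySem.Chars.join ", ".toList (pvItems L).dropLast ++ ", ".toList ++ p)
            = PySem.Chars.join ", ".toList (pvItems L)
        rcases hD : (pvItems L).dropLast with _ | ⟨x, t⟩
        · rw [hD] at hsplit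
          rw [← hsplit]
          simp [PySem.Chars.join, List.intercalate]
        · have hxne : x ≠ [] := by
            apply pv_items_ne L
            have : x ∈ (pvItems L).dropLast := by rw [hD]; simp
            exact List.dropLast_subset _ this
          rw [if_neg (by simpa [List.isEmpty_iff] using pv_join_ne x t hxne)]
          rw [← hsplit, hD, pv_join_snoc _ _ (by simp)]

-- B's final dispatch on the loop state computes pvAltCore of the items
theorem pv_alt_eq (text : String) :
    directive_list_and_alt text = pvAltCore (pvItems (PySem.Chars.splitlines text.toList)) := by
  unfold directive_list_and_alt
  rw [pv_fold_eq]
  rcases hI : pvItems (PySem.Chars.splitlines text.toList) with _ | ⟨x, t⟩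
  · simp [pvAltCore]
  · have hxne : x ≠ [] := pv_items_ne _ x (by rw [hI]; simp)
    cases t with
    | nil => simp [pvAltCore, PySem.Chars.join, List.intercalate]
    | cons y t' =>
      have hjne : PySem.Chars.join ", ".toList ((x :: y :: t').dropLast) ≠ [] := by
        rw [List.dropLast_cons_of_ne_nil (by simp)]
        exact pv_join_ne x _ hxne
      simp only [List.getLast?_eq_some_getLast (l := x :: y :: t') (by simp)]
      rw [if_neg (by simpa [List.isEmpty_iff] using hjne)]
      unfold pvAltCore
      rw [List.getLast_cons (by simp)]

-- A reduces to pvAltCore of the same items (its trailing strip is a no-op)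
theorem pv_core (items : List (List Char))
    (hmem : ∀ l ∈ items, PySem.Chars.strip l = l ∧ l ≠ []) :
    String.ofList (PySem.Chars.strip
      (let st :=
        match PySem.List.pop? items with
        | some (x, rest) => (rest, x)
        | none => (items, ([] : List Char));
       let result := PySem.Chars.join ", ".toList st.1;
       if result.isEmpty then st.2 else result ++ " and ".toList ++ st.2))
    = pvAltCore items := by
  unfold pvAltCore
  match items with
  | [] =>
    simp [PySem.List.pop?, PySem.List.pyIdx?, PySem.Chars.join, List.intercalate,
          PySem.Chars.strip, PySem.Chars.lstrip, PySem.Chars.rstrip]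
  | [x] =>
    obtain ⟨hx, hxne⟩ := hmem x (by simp)
    rw [pv_pop_eq]
    simp only [List.getLast_singleton]
    simp [PySem.Chars.join, List.intercalate, hx]
  | x :: y :: t =>
    have hxmem := hmem x (by simp)
    have hlastmem := hmem ((x :: y :: t).getLast (by simp)) (List.getLast_mem _)
    rw [pv_pop_eq]
    have hdl : (x :: y :: t).dropLast = x :: (y :: t).dropLast := by
      simp [List.dropLast_cons_of_ne_nil]
    have hjoin_ne : PySem.Chars.join ", ".toList (x :: y :: t).dropLast ≠ [] := by
      rw [hdl]
      exact pv_join_ne x _ hxmem.2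
    rw [if_neg (by rw [List.isEmpty_iff]; exact hjoin_ne)]
    congr 1
    set mid := PySem.Chars.join ", ".toList (x :: y :: t).dropLast with hmid
    set lst := (x :: y :: t).getLast (by simp) with hlst
    apply pv_strip_of_noedge
    · intro c hc
      rw [List.append_assoc, List.head?_append] at hc
      have hhead : mid.head? = x.head? := by
        rw [hmid, hdl, pv_join_head x _ hxmem.2]
      rcases hx0 : x.head? with _ | a
      · exact absurd (List.head?_eq_none_iff.mp hx0) hxmem.2
      · rw [hhead, hx0] at hc
        simp at hc; subst hc
        have : a ∈ (PySem.Chars.strip x).head? := by rw [hxmem.1, hx0]; rfl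
        exact pv_noedge_head x a this
    · intro c hc
      rw [List.append_assoc, List.getLast?_append] at hc
      have hlstne : lst ≠ [] := hlastmem.2
      have : (" and ".toList ++ lst).getLast? = lst.getLast? := by
        rw [List.getLast?_append]
        exact Option.or_of_isSome (by simp [List.getLast?_isSome, hlstne])
      rw [this] at hc
      rw [Option.mem_def] at hc
      rcases hl : lst.getLast? with _ | a
      · exact absurd (List.getLast?_eq_none_iff.mp hl) hlstne
      · rw [hl] at hc
        simp at hc; subst hc
        have : a ∈ (PySem.Chars.strip lst).getLast? := by
          rw [hlastmem.1]; exact hl ▸ rfl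
        exact pv_noedge_last lst a this

-- ===== VERDICT (by name: the statement is the Claim_ definition above) =====
theorem directive_list_and_spec : Claim_equal_directive_list_and := by
  intro text _
  unfold Spec_directive_list_and
  rw [pv_alt_eq]
  rw [pv_filterMap_eq]
  have hmem : ∀ l ∈ ((PySem.Chars.splitlines text.toList).map PySem.Chars.strip).filter
      (fun l => !l.isEmpty), PySem.Chars.strip l = l ∧ l ≠ [] := by
    intro l hl
    rw [List.mem_filter] at hl
    obtain ⟨hmap, hne⟩ := hl
    obtain ⟨ln, _, rfl⟩ := List.mem_map.mp hmap
    exact ⟨pv_strip_idem ln, by simpa using hne⟩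
  exact pv_core _ hmem
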